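-- pv_equiv track=rewrite | github.com/sidney-pham/truth-tables | assorted-parsey-stuff/binary_counter.py | nextAssignment
-- ===== SOURCE A (Python) =====
-- def nextAssignment(assignment):
--   flipIndex = len(assignment) - 1
--   while flipIndex >= 0 and assignment[flipIndex]:
--     flipIndex -= 1
--
--   if flipIndex == -1:
--     return False
--
--   assignment[flipIndex] = True
--
--   for i in range(flipIndex + 1, len(assignment)):
--     assignment[i] = False
--
--   return True
-- ===== SOURCE B (Python) =====
-- def nextAssignment(assignment):
--   # Arithmetic increment: read the assignment as a binary number, add 1,
--   # write the bits back; overflow (all True) means no next assignment.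
--   n = len(assignment)
--   v = 0
--   for b in assignment:
--     v = v * 2 + (1 if b else 0)
--   v += 1
--   if v == 1 << n:
--     return False
--   for i in range(n - 1, -1, -1):
--     assignment[i] = bool(v & 1)
--     v >>= 1
--   return True
-- ===== Notes on version B (the rewrite author's own statement) =====
-- stated objective: alternative
-- what changed: B reads the assignment as one binary integer, adds 1 and writes the bits back (overflow = no next assignment), instead of A's backward search for the flip position followed by a forward clearing loop; it trades A's bit-local loops for big-integer arithmetic.
import Mathlib
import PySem

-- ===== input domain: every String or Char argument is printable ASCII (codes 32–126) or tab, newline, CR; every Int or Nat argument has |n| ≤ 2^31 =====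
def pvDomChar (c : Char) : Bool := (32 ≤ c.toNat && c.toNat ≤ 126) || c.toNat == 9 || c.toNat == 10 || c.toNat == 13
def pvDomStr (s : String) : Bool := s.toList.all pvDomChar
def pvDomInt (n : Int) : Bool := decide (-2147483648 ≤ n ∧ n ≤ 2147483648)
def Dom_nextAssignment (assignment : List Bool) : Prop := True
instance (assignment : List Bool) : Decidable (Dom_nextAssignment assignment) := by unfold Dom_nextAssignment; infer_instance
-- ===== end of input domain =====

-- B increments the assignment arithmetically (binary value + 1) instead of A's search-then-clear;
-- both Pythons mutate `assignment` in place identically, and the equivalence proved here is about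
-- the Bool RETURN value only.

-- ===== PORT A =====
-- A's while loop: flipIndex runs from len-1 downward while assignment[flipIndex] is True.
-- Recursion argument n stands for flipIndex + 1; returns the final flipIndex.
def pvFindFlip (a : List Bool) : Nat → Int
  | 0 => -1
  | n + 1 => if a.getD n false then pvFindFlip a n else (n : Int)

-- A's in-place mutation (assignment[flipIndex] = True; clearing loop) does not affect the Bool
-- return value, so the port returns False iff flipIndex == -1, True otherwise, as A does.
def nextAssignment (assignment : List Bool) : Bool :=
  let flipIndex := pvFindFlip assignment assignment.length
  if flipIndex = -1 then false else true

-- ===== PORT B =====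
-- B's first loop: the binary value of the assignment.
def pvBinVal (a : List Bool) : Int :=
  a.foldl (fun v b => v * 2 + (if b then 1 else 0)) 0

-- B's write-back loop mutates the list only; the Bool return is False exactly on overflow.
def nextAssignment_alt (assignment : List Bool) : Bool :=
  let v := pvBinVal assignment + 1
  if v = 2 ^ assignment.length then false else true

-- ===== PRECONDITION & SPEC =====
def Spec_nextAssignment (assignment : List Bool) (out : Bool) : Prop := out = nextAssignment_alt assignment
instance (assignment : List Bool) (out : Bool) : Decidable (Spec_nextAssignment assignment out) := by unfold Spec_nextAssignment; infer_instance

-- ===== CLAIM (what is proved, stated in full; the proofs are below) =====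
def Claim_equal_nextAssignment : Prop := ∀ (assignment : List Bool), Dom_nextAssignment assignment → Spec_nextAssignment assignment (nextAssignment assignment)

-- ===== LEMMAS AND PROOFS =====

-- A's search reaches -1 iff the first n entries are all True.
theorem pvFindFlip_eq_neg_one_iff (a : List Bool) (n : Nat) :
    pvFindFlip a n = -1 ↔ ∀ i, i < n → a.getD i false = true := by
  induction n with
  | zero => simp [pvFindFlip]
  | succ n ih =>
    by_cases h : a.getD n false = true
    · simp only [pvFindFlip, h, if_true, ih]
      constructor
      · intro hall i hi
        rcases Nat.lt_succ_iff_lt_or_eq.mp hi with hlt | rfl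
        · exact hall i hlt
        · exact h
      · intro hall i hi; exact hall i (Nat.lt_succ_of_lt hi)
    · simp only [pvFindFlip, h, if_false]
      constructor
      · intro hn
        exfalso
        have hne : ((n : Int)) ≠ -1 := by omega
        exact hne hn
      · intro hall; exact absurd (hall n (Nat.lt_succ_self n)) h

-- foldl of the binary-value step shifts the accumulator by 2^length.
theorem pvBinVal_foldl_shift (l : List Bool) (acc : Int) :
    l.foldl (fun v b => v * 2 + (if b then 1 else 0)) acc
      = acc * 2 ^ l.length + pvBinVal l := by
  induction l generalizing acc with
  | nil => simp [pvBinVal]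
  | cons b t ih =>
    simp only [List.foldl_cons, List.length_cons, pvBinVal]
    rw [ih, ih]
    ring

theorem pvBinVal_cons (b : Bool) (t : List Bool) :
    pvBinVal (b :: t) = (if b then 1 else 0) * 2 ^ t.length + pvBinVal t := by
  simp only [pvBinVal, List.foldl_cons]
  rw [pvBinVal_foldl_shift]
  simp only [pvBinVal]
  ring

-- The binary value is bounded and hits the maximum exactly on the all-True assignment.
theorem pvBinVal_bounds (l : List Bool) :
    0 ≤ pvBinVal l ∧ pvBinVal l ≤ 2 ^ l.length - 1 ∧
      (pvBinVal l = 2 ^ l.length - 1 ↔ ∀ i, i < l.length → l.getD i false = true) := by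
  induction l with
  | nil => simp [pvBinVal]
  | cons b t ih =>
    obtain ⟨h0, hub, hiff⟩ := ih
    have hpow : (0:Int) < 2 ^ t.length := by positivity
    rw [pvBinVal_cons]
    simp only [List.length_cons, pow_succ]
    cases b with
    | false =>
      simp only [Bool.false_eq_true, if_false, zero_mul, zero_add]
      refine ⟨h0, by omega, ?_⟩
      constructor
      · intro heq; omega
      · intro hall
        have := hall 0 (Nat.succ_pos _)
        simp [List.getD] at this
    | true =>
      simp only [if_true, one_mul]
      refine ⟨by omega, by omega, ?_⟩
      constructor
      · intro heq i hi
        have ht : pvBinVal t = 2 ^ t.length - 1 := by omega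
        match i with
        | 0 => simp [List.getD]
        | Nat.succ j =>
          have hj : j < t.length := by simpa using hi
          simpa [List.getD] using hiff.mp ht j hj
      · intro hall
        have ht : pvBinVal t = 2 ^ t.length - 1 := by
          apply hiff.mpr
          intro j hj
          simpa [List.getD] using hall (j+1) (by simpa using hj)
        omega

-- ===== VERDICT (by name: the statement is the Claim_ definition above) =====
theorem nextAssignment_spec : Claim_equal_nextAssignment := by
  intro a _
  unfold Spec_nextAssignment nextAssignment nextAssignment_alt
  obtain ⟨h0, hub, hiff⟩ := pvBinVal_bounds a
  by_cases h : ∀ i, i < a.length → a.getD i false = true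
  · rw [if_pos ((pvFindFlip_eq_neg_one_iff a a.length).mpr h),
        if_pos (by have := hiff.mpr h; omega)]
  · rw [if_neg (fun hc => h ((pvFindFlip_eq_neg_one_iff a a.length).mp hc)),
        if_neg (fun hc => h (hiff.mp (by omega)))]
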